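-- pv_equiv track=rewrite | github.com/PKU-Alignment/align-anything | align_anything/utils/tools.py | count_right_padding
-- ===== SOURCE A (Python) =====
-- def count_right_padding(lst, padding=0):
--     """Counts the number of padding values (default is 0) on the right side of a list.
--
--     This function iterates over the elements of the given list from the end to the start.
--     It stops counting when it encounters the first non-padding element.
--
--     Args:
--         lst (List): The list to be checked.
--         padding (int, optional): The value considered as padding. Defaults to 0.
--
--     Returns:
--         int: The number of padding values on the right side of the list.
--     """
--     count = 0
--     # Iterate over the list in reverse order
--     for i in range(len(lst) - 1, -1, -1):
--         if lst[i] == padding: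
--             count += 1
--         else:
--             # Stop counting when a non-padding value is encountered
--             break
--
--     return count
-- ===== SOURCE B (Python) =====
-- def count_right_padding(lst, padding=0):
--     """Single forward pass: track the index of the last non-padding element."""
--     last = -1
--     for i, x in enumerate(lst):
--         if x != padding:
--             last = i
--     return len(lst) - 1 - last
-- ===== Notes on version B (the rewrite author's own statement) =====
-- stated objective: alternative
-- what changed: Replaced the backward scan with early break and a running counter by a single forward pass with enumerate that tracks the last non-padding index and returns len(lst)-1-last.
import Mathlib
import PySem

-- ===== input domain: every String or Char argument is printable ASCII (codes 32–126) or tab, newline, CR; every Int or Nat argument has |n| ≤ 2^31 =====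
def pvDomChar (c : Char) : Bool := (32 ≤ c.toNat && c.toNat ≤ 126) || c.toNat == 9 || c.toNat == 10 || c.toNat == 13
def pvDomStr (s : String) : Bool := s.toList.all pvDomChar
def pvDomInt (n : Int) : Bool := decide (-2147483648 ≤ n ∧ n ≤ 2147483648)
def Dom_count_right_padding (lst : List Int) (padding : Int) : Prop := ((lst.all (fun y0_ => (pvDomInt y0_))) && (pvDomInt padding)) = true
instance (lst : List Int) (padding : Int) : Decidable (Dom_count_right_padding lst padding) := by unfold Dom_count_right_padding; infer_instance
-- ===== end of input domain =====

-- B replaces A's backward early-break scan by one forward pass tracking the last non-padding index (objective: alternative decomposition).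

-- ===== PORT A =====
-- helper: A's reverse loop with break — count while elements equal padding, stop at first mismatch
def crpLoopA (padding : Int) : List Int → Int
  | [] => 0
  | x :: rest => if x == padding then 1 + crpLoopA padding rest else 0

def count_right_padding (lst : List Int) (padding : Int) : Int :=
  crpLoopA padding lst.reverse

-- ===== PORT B =====
def count_right_padding_alt (lst : List Int) (padding : Int) : Int :=
  let last := (PySem.List.enumerate lst).foldl
    (fun last (p : Int × Int) => if p.2 != padding then p.1 else last) (-1)
  (lst.length : Int) - 1 - last

-- ===== PRECONDITION & SPEC =====
def Spec_count_right_padding (lst : List Int) (padding : Int) (out : Int) : Prop := out = count_right_padding_alt lst padding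
instance (lst : List Int) (padding : Int) (out : Int) : Decidable (Spec_count_right_padding lst padding out) := by unfold Spec_count_right_padding; infer_instance

-- ===== CLAIM (what is proved, stated in full; the proofs are below) =====
def Claim_equal_count_right_padding : Prop := ∀ (lst : List Int) (padding : Int), Dom_count_right_padding lst padding → Spec_count_right_padding lst padding (count_right_padding lst padding)

-- ===== LEMMAS AND PROOFS =====

-- ===== VERDICT (by name: the statement is the Claim_ definition above) =====
lemma crp_key (padding : Int) (lst : List Int) (s : Int) :
    crpLoopA padding lst.reverse =
      (s + lst.length) - 1 -
        (PySem.List.enumerate lst s).foldl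
          (fun last (p : Int × Int) => if p.2 != padding then p.1 else last) (s - 1) := by
  induction lst using List.reverseRecOn with
  | nil => simp [crpLoopA, PySem.List.enumerate]
  | append_singleton l x ih =>
      rw [PySem.List.enumerate_append, List.foldl_append]
      simp only [PySem.List.enumerate, List.reverse_append, List.reverse_cons,
        List.reverse_nil, List.nil_append, List.cons_append, crpLoopA,
        List.foldl_cons, List.foldl_nil, List.length_append, List.length_cons,
        List.length_nil]
      by_cases hx : x == padding
      · have hx' : (x != padding) = false := by simp_all
        rw [hx']
        simp only [hx, if_true]
        rw [ih]
        push_cast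
        ring
      · have hx' : (x != padding) = true := by simp_all
        rw [hx']
        simp only [hx]
        push_cast
        ring

theorem count_right_padding_spec : Claim_equal_count_right_padding := by
  intro lst padding _
  unfold Spec_count_right_padding count_right_padding count_right_padding_alt
  have := crp_key padding lst 0
  rw [this]; norm_num
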